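-- pv_equiv track=rewrite | github.com/theMaxscriptGuy/ContentMate | apps/api/app/utils/text.py | detect_niche
-- ===== SOURCE A (Python) =====
-- from collections import Counter
--
-- TOPIC_BUCKETS = {
--     "ai": {"ai", "openai", "gpt", "agent", "automation", "prompt"},
--     "business": {"business", "startup", "sales", "marketing", "finance", "revenue"},
--     "education": {"learn", "tutorial", "guide", "course", "lesson", "explained"},
--     "gaming": {"game", "gaming", "minecraft", "roblox", "fps", "stream"},
--     "technology": {"software", "tech", "coding", "developer", "programming", "python"},
--     "lifestyle": {"routine", "mindset", "health", "fitness", "productivity", "life"},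
-- }
--
-- def detect_niche(topic_counter: Counter[str], joined_text: str) -> str:
--     scores = {
--         niche: sum(topic_counter.get(keyword, 0) for keyword in keywords)
--         for niche, keywords in TOPIC_BUCKETS.items()
--     }
--     best_niche = max(scores, key=scores.get) if scores else "general"
--     if scores.get(best_niche, 0) == 0:
--         return "general commentary"
--     return best_niche
-- ===== SOURCE B (Python) =====
-- from collections import Counter
--
-- TOPIC_BUCKETS = {
--     "ai": {"ai", "openai", "gpt", "agent", "automation", "prompt"},
--     "business": {"business", "startup", "sales", "marketing", "finance", "revenue"},
--     "education": {"learn", "tutorial", "guide", "course", "lesson", "explained"},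
--     "gaming": {"game", "gaming", "minecraft", "roblox", "fps", "stream"},
--     "technology": {"software", "tech", "coding", "developer", "programming", "python"},
--     "lifestyle": {"routine", "mindset", "health", "fitness", "productivity", "life"},
-- }
--
-- # Inverted index: keyword -> its niche (the keyword sets are disjoint).
-- KEYWORD_TO_NICHE = {
--     keyword: niche
--     for niche, keywords in TOPIC_BUCKETS.items()
--     for keyword in keywords
-- }
--
-- def detect_niche(topic_counter: Counter[str], joined_text: str) -> str:
--     # scores initialized in TOPIC_BUCKETS order so max() tie-breaking matches
--     scores = {niche: 0 for niche in TOPIC_BUCKETS}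
--     for word, count in topic_counter.items():
--         niche = KEYWORD_TO_NICHE.get(word)
--         if niche is not None:
--             scores[niche] = scores[niche] + count
--     best_niche = max(scores, key=scores.get)
--     if scores[best_niche] == 0:
--         return "general commentary"
--     return best_niche
-- ===== Notes on version B (the rewrite author's own statement) =====
-- stated objective: alternative
-- what changed: Replaces the per-bucket keyword sums (36 counter lookups per call) with a precomputed inverted keyword->niche index and a single pass over the counter's items accumulating into zero-initialized bucket scores.
import Mathlib
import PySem

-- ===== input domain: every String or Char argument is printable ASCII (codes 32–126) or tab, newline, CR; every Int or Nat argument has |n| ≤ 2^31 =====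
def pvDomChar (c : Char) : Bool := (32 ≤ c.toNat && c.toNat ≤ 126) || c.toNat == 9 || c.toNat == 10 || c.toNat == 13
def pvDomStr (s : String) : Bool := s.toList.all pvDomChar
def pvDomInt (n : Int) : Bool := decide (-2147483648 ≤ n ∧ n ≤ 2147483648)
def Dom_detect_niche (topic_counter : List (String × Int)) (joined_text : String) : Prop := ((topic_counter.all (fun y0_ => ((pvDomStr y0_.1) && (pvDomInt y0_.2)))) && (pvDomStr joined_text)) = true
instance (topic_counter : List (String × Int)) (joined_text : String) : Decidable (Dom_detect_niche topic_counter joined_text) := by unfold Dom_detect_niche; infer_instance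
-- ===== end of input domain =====

-- B replaces A's per-bucket keyword sums with a precomputed inverted keyword->niche index and
-- a single accumulation pass over the counter's items (alternative decomposition, same result).


-- ===== PORT A =====
-- TOPIC_BUCKETS: each keyword set is held as the list of its distinct elements.
def TOPIC_BUCKETS : List (String × List String) :=
  [("ai", ["ai", "openai", "gpt", "agent", "automation", "prompt"]),
   ("business", ["business", "startup", "sales", "marketing", "finance", "revenue"]),
   ("education", ["learn", "tutorial", "guide", "course", "lesson", "explained"]),
   ("gaming", ["game", "gaming", "minecraft", "roblox", "fps", "stream"]),
   ("technology", ["software", "tech", "coding", "developer", "programming", "python"]),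
   ("lifestyle", ["routine", "mindset", "health", "fitness", "productivity", "life"])]

def detect_niche (topic_counter : List (String × Int)) (joined_text : String) : String :=
  let tcd := PySem.Dict.ofList topic_counter
  let scores : PySem.Dict String Int :=
    PySem.Dict.ofList (TOPIC_BUCKETS.map (fun nk => (nk.1, (nk.2.map (fun kw => tcd.getD kw 0)).sum)))
  let best := match PySem.List.max? scores.keys (fun n => scores.getD n 0) with
    | some b => b
    | none => "general"     -- 'if scores else "general"': max? is none exactly when scores is empty
  if scores.getD best 0 == 0 then "general commentary" else best

-- ===== PORT B =====
-- inverted index keyword -> niche (the double dict comprehension of Source B)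
def KEYWORD_TO_NICHE : PySem.Dict String String :=
  PySem.Dict.ofList (TOPIC_BUCKETS.flatMap (fun nk => nk.2.map (fun kw => (kw, nk.1))))

-- loop body of Source B: look the word up in the index, add its count to that niche's score
def nicheStep (sc : PySem.Dict String Int) (p : String × Int) : PySem.Dict String Int :=
  match KEYWORD_TO_NICHE.get? p.1 with
  | some n => sc.insert n (sc.getD n 0 + p.2)
  | none => sc

def detect_niche_alt (topic_counter : List (String × Int)) (joined_text : String) : String :=
  let scores0 : PySem.Dict String Int :=
    PySem.Dict.ofList (TOPIC_BUCKETS.map (fun nk => (nk.1, 0)))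
  let scores := (PySem.Dict.ofList topic_counter).items.foldl nicheStep scores0
  let best := match PySem.List.max? scores.keys (fun n => scores.getD n 0) with
    | some b => b
    | none => ""            -- unreachable guard: scores always carries the six bucket keys
  if scores.getD best 0 == 0 then "general commentary" else best

-- ===== PRECONDITION & SPEC =====
def Spec_detect_niche (topic_counter : List (String × Int)) (joined_text : String) (out : String) : Prop := out = detect_niche_alt topic_counter joined_text
instance (topic_counter : List (String × Int)) (joined_text : String) (out : String) : Decidable (Spec_detect_niche topic_counter joined_text out) := by unfold Spec_detect_niche; infer_instance

-- ===== CLAIM (what is proved, stated in full; the proofs are below) =====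
def Claim_equal_detect_niche : Prop := ∀ (topic_counter : List (String × Int)) (joined_text : String), Dom_detect_niche topic_counter joined_text → Spec_detect_niche topic_counter joined_text (detect_niche topic_counter joined_text)

-- ===== LEMMAS AND PROOFS =====

-- total count mass of l carried by words in K
def bsum (K : List String) (l : List (String × Int)) : Int :=
  ((l.filter (fun p => decide (p.1 ∈ K))).map Prod.snd).sum

lemma bsum_nil (K : List String) : bsum K [] = 0 := rfl

lemma bsum_cons (K : List String) (w : String) (c : Int) (l : List (String × Int)) :
    bsum K ((w, c) :: l) = (if w ∈ K then c else 0) + bsum K l := by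
  by_cases h : w ∈ K <;> simp [bsum, h]

-- pulling one association (w, c) out of a sum of lookups over a duplicate-free key list K,
-- when g itself already reads w as 0 (w is a fresh key)
lemma sum_ite_mem (w : String) (c : Int) (g : String → Int) (K : List String) (hK : K.Nodup)
    (hgw : g w = 0) :
    (K.map (fun kw => if (w == kw) then c else g kw)).sum
      = (if w ∈ K then c else 0) + (K.map g).sum := by
  induction K with
  | nil => simp
  | cons k t ih =>
    rcases List.nodup_cons.mp hK with ⟨hkt, ht⟩
    by_cases hwk : w = k
    · subst hwk
      have hmap : (t.map (fun kw => if (w == kw) then c else g kw)) = t.map g := by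
        apply List.map_congr_left
        intro x hx
        have hne : w ≠ x := fun h => hkt (h ▸ hx)
        simp [hne]
      rw [List.map_cons, List.sum_cons, List.map_cons, List.sum_cons, hmap]
      simp [hgw]
    · have hbe : (w == k) = false := by simp [hwk]
      simp only [List.map_cons, List.sum_cons, hbe, Bool.false_eq_true, if_false, ih ht,
        List.mem_cons]
      by_cases hwt : w ∈ t <;> simp [hwt, hwk] <;> try ring

-- A's per-bucket sum of counter lookups equals the filtered count mass of the association list
lemma sum_getD_eq_bsum (l : List (String × Int)) (K : List String) (hK : K.Nodup)
    (hl : (l.map Prod.fst).Nodup) :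
    (K.map (fun kw => (PySem.Dict.mk l).getD kw 0)).sum = bsum K l := by
  induction l with
  | nil =>
    have h0 : (K.map (fun kw => (PySem.Dict.mk ([] : List (String × Int))).getD kw 0)) = K.map (fun _ => (0 : Int)) := by
      apply List.map_congr_left; intro kw _; rfl
    simp [h0, bsum_nil]
  | cons p t ih =>
    obtain ⟨w, c⟩ := p
    have hstep : (K.map (fun kw => (PySem.Dict.mk ((w, c) :: t)).getD kw 0))
        = K.map (fun kw => if (w == kw) then c else (PySem.Dict.mk t).getD kw 0) := by
      apply List.map_congr_left; intro kw _
      by_cases h : (w == kw) = true <;>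
        simp [PySem.Dict.getD_eq_get?_getD, PySem.Dict.get?_mk_cons, h]
    have hwt : w ∉ (PySem.Dict.mk t).keys := by
      simpa [PySem.Dict.keys] using (List.nodup_cons.mp hl).1
    have hg0 : (PySem.Dict.mk t).getD w 0 = 0 := by
      rw [PySem.Dict.getD_eq_get?_getD, (PySem.Dict.get?_eq_none_iff_not_mem_keys _ _).mpr hwt]
      rfl
    rw [hstep, sum_ite_mem w c _ K hK hg0, ih (List.nodup_cons.mp hl).2, bsum_cons]

lemma nicheStep_none (sc : PySem.Dict String Int) (p : String × Int)
    (hg : KEYWORD_TO_NICHE.get? p.1 = none) : nicheStep sc p = sc := by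
  unfold nicheStep; rw [hg]

lemma nicheStep_some (sc : PySem.Dict String Int) (p : String × Int) (n : String)
    (hg : KEYWORD_TO_NICHE.get? p.1 = some n) :
    nicheStep sc p = sc.insert n (sc.getD n 0 + p.2) := by
  unfold nicheStep; rw [hg]

-- the literal inverted index, in mk form
set_option maxRecDepth 100000 in
lemma kwn_eq : KEYWORD_TO_NICHE = PySem.Dict.mk
    [("ai", "ai"), ("openai", "ai"), ("gpt", "ai"), ("agent", "ai"), ("automation", "ai"), ("prompt", "ai"),
     ("business", "business"), ("startup", "business"), ("sales", "business"), ("marketing", "business"), ("finance", "business"), ("revenue", "business"),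
     ("learn", "education"), ("tutorial", "education"), ("guide", "education"), ("course", "education"), ("lesson", "education"), ("explained", "education"),
     ("game", "gaming"), ("gaming", "gaming"), ("minecraft", "gaming"), ("roblox", "gaming"), ("fps", "gaming"), ("stream", "gaming"),
     ("software", "technology"), ("tech", "technology"), ("coding", "technology"), ("developer", "technology"), ("programming", "technology"), ("python", "technology"),
     ("routine", "lifestyle"), ("mindset", "lifestyle"), ("health", "lifestyle"), ("fitness", "lifestyle"), ("productivity", "lifestyle"), ("life", "lifestyle")] := by
  decide

-- characterization of B's accumulation loop, for any starting scores of the fixed shape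
set_option maxRecDepth 100000 in
set_option maxHeartbeats 2000000 in
lemma fold_nicheStep_char (l : List (String × Int)) :
    ∀ a1 a2 a3 a4 a5 a6 : Int,
    l.foldl nicheStep (PySem.Dict.mk
        [("ai", a1), ("business", a2), ("education", a3), ("gaming", a4), ("technology", a5), ("lifestyle", a6)])
      = PySem.Dict.mk
        [("ai", a1 + bsum ["ai", "openai", "gpt", "agent", "automation", "prompt"] l),
         ("business", a2 + bsum ["business", "startup", "sales", "marketing", "finance", "revenue"] l),
         ("education", a3 + bsum ["learn", "tutorial", "guide", "course", "lesson", "explained"] l),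
         ("gaming", a4 + bsum ["game", "gaming", "minecraft", "roblox", "fps", "stream"] l),
         ("technology", a5 + bsum ["software", "tech", "coding", "developer", "programming", "python"] l),
         ("lifestyle", a6 + bsum ["routine", "mindset", "health", "fitness", "productivity", "life"] l)] := by
  induction l with
  | nil => intro a1 a2 a3 a4 a5 a6; simp [bsum_nil]
  | cons p t ih =>
    intro a1 a2 a3 a4 a5 a6
    obtain ⟨w, c⟩ := p
    rw [List.foldl_cons]
    rcases hg : KEYWORD_TO_NICHE.get? w with _ | n
    · -- word not in the index: no bucket contains it
      have hnk : w ∉ KEYWORD_TO_NICHE.keys := by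
        rw [← PySem.Dict.get?_eq_none_iff_not_mem_keys]; exact hg
      rw [kwn_eq] at hnk
      simp only [PySem.Dict.keys, List.map_cons, List.map_nil, List.mem_cons,
        List.not_mem_nil, or_false, not_or] at hnk
      rw [nicheStep_none _ _ hg, ih]
      obtain ⟨h1, h2, h3, h4, h5, h6, h7, h8, h9, h10, h11, h12, h13, h14, h15, h16, h17, h18,
        h19, h20, h21, h22, h23, h24, h25, h26, h27, h28, h29, h30, h31, h32, h33, h34, h35, h36⟩ := hnk
      simp [bsum_cons, h1, h2, h3, h4, h5, h6, h7, h8, h9, h10, h11, h12, h13,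
        h14, h15, h16, h17, h18, h19, h20, h21, h22, h23, h24, h25, h26, h27, h28, h29, h30,
        h31, h32, h33, h34, h35, h36]
    · -- word maps to niche n: (w, n) is one of the 36 literal index entries
      have hmem : (w, n) ∈ KEYWORD_TO_NICHE.items := PySem.Dict.mem_items_of_get?_eq_some KEYWORD_TO_NICHE hg
      rw [kwn_eq] at hmem
      simp only [List.mem_cons, List.not_mem_nil, or_false, Prod.mk.injEq] at hmem
      rcases hmem with ⟨rfl, rfl⟩|⟨rfl, rfl⟩|⟨rfl, rfl⟩|⟨rfl, rfl⟩|⟨rfl, rfl⟩|⟨rfl, rfl⟩|⟨rfl, rfl⟩|⟨rfl, rfl⟩|⟨rfl, rfl⟩|⟨rfl, rfl⟩|⟨rfl, rfl⟩|⟨rfl, rfl⟩|⟨rfl, rfl⟩|⟨rfl, rfl⟩|⟨rfl, rfl⟩|⟨rfl, rfl⟩|⟨rfl, rfl⟩|⟨rfl, rfl⟩|⟨rfl, rfl⟩|⟨rfl, rfl⟩|⟨rfl, rfl⟩|⟨rfl, rfl⟩|⟨rfl, rfl⟩|⟨rfl, rfl⟩|⟨rfl, rfl⟩|⟨rfl,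 rfl⟩|⟨rfl, rfl⟩|⟨rfl, rfl⟩|⟨rfl, rfl⟩|⟨rfl, rfl⟩|⟨rfl, rfl⟩|⟨rfl, rfl⟩|⟨rfl, rfl⟩|⟨rfl, rfl⟩|⟨rfl, rfl⟩|⟨rfl, rfl⟩ <;>
      · rw [nicheStep_some _ _ _ hg]
        simp only [PySem.Dict.getD_eq_get?_getD, PySem.Dict.get?_mk_cons]
        simp only [PySem.Dict.insert]
        simp
        rw [ih]
        simp [bsum_cons]
        try omega

-- the final selection steps agree whenever the two score dicts are equal and nonempty
lemma finish_eq (s : PySem.Dict String Int) (hne : s.keys ≠ []) :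
    (if s.getD (match PySem.List.max? s.keys (fun n => s.getD n 0) with
                | some b => b | none => "general") 0 == 0 then "general commentary"
     else (match PySem.List.max? s.keys (fun n => s.getD n 0) with
           | some b => b | none => "general"))
  = (if s.getD (match PySem.List.max? s.keys (fun n => s.getD n 0) with
                | some b => b | none => "") 0 == 0 then "general commentary"
     else (match PySem.List.max? s.keys (fun n => s.getD n 0) with
           | some b => b | none => "")) := by
  rcases h : PySem.List.max? s.keys (fun n => s.getD n 0) with _ | b
  · exact absurd ((PySem.List.max?_eq_none_iff _ _).mp h) hne
  · simp

-- ===== VERDICT (by name: the statement is the Claim_ definition above) =====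
set_option maxRecDepth 100000 in
set_option maxHeartbeats 2000000 in
theorem detect_niche_spec : Claim_equal_detect_niche := by
  intro tc jt _
  unfold Spec_detect_niche detect_niche detect_niche_alt
  have htc : PySem.Dict.ofList tc = PySem.Dict.mk (PySem.Dict.ofList tc).items := rfl
  have hA : PySem.Dict.ofList (TOPIC_BUCKETS.map
        (fun nk => (nk.1, (nk.2.map (fun kw => (PySem.Dict.ofList tc).getD kw 0)).sum)))
      = PySem.Dict.mk
        [("ai", bsum ["ai", "openai", "gpt", "agent", "automation", "prompt"] (PySem.Dict.ofList tc).items),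
         ("business", bsum ["business", "startup", "sales", "marketing", "finance", "revenue"] (PySem.Dict.ofList tc).items),
         ("education", bsum ["learn", "tutorial", "guide", "course", "lesson", "explained"] (PySem.Dict.ofList tc).items),
         ("gaming", bsum ["game", "gaming", "minecraft", "roblox", "fps", "stream"] (PySem.Dict.ofList tc).items),
         ("technology", bsum ["software", "tech", "coding", "developer", "programming", "python"] (PySem.Dict.ofList tc).items),
         ("lifestyle", bsum ["routine", "mindset", "health", "fitness", "productivity", "life"] (PySem.Dict.ofList tc).items)] := by
    rw [htc]
    have hnd : ((PySem.Dict.ofList tc).items.map Prod.fst).Nodup := by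
      simpa [PySem.Dict.keys] using PySem.Dict.nodup_keys_ofList tc
    have e1 := sum_getD_eq_bsum (PySem.Dict.ofList tc).items ["ai", "openai", "gpt", "agent", "automation", "prompt"] (by decide) hnd
    have e2 := sum_getD_eq_bsum (PySem.Dict.ofList tc).items ["business", "startup", "sales", "marketing", "finance", "revenue"] (by decide) hnd
    have e3 := sum_getD_eq_bsum (PySem.Dict.ofList tc).items ["learn", "tutorial", "guide", "course", "lesson", "explained"] (by decide) hnd
    have e4 := sum_getD_eq_bsum (PySem.Dict.ofList tc).items ["game", "gaming", "minecraft", "roblox", "fps", "stream"] (by decide) hnd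
    have e5 := sum_getD_eq_bsum (PySem.Dict.ofList tc).items ["software", "tech", "coding", "developer", "programming", "python"] (by decide) hnd
    have e6 := sum_getD_eq_bsum (PySem.Dict.ofList tc).items ["routine", "mindset", "health", "fitness", "productivity", "life"] (by decide) hnd
    simp only [List.map_cons, List.map_nil] at e1 e2 e3 e4 e5 e6
    simp only [TOPIC_BUCKETS, List.map_cons, List.map_nil]
    rw [e1, e2, e3, e4, e5, e6]
    simp [PySem.Dict.ofList, PySem.Dict.update, PySem.Dict.insert, PySem.Dict.empty]
  have hB0 : PySem.Dict.ofList (TOPIC_BUCKETS.map (fun nk => (nk.1, (0 : Int))))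
      = PySem.Dict.mk [("ai", 0), ("business", 0), ("education", 0), ("gaming", 0), ("technology", 0), ("lifestyle", 0)] := by
    simp [TOPIC_BUCKETS, PySem.Dict.ofList, PySem.Dict.update, PySem.Dict.insert, PySem.Dict.empty]
  have hB : (PySem.Dict.ofList tc).items.foldl nicheStep
        (PySem.Dict.ofList (TOPIC_BUCKETS.map (fun nk => (nk.1, (0 : Int)))))
      = PySem.Dict.mk
        [("ai", bsum ["ai", "openai", "gpt", "agent", "automation", "prompt"] (PySem.Dict.ofList tc).items),
         ("business", bsum ["business", "startup", "sales", "marketing", "finance", "revenue"] (PySem.Dict.ofList tc).items),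
         ("education", bsum ["learn", "tutorial", "guide", "course", "lesson", "explained"] (PySem.Dict.ofList tc).items),
         ("gaming", bsum ["game", "gaming", "minecraft", "roblox", "fps", "stream"] (PySem.Dict.ofList tc).items),
         ("technology", bsum ["software", "tech", "coding", "developer", "programming", "python"] (PySem.Dict.ofList tc).items),
         ("lifestyle", bsum ["routine", "mindset", "health", "fitness", "productivity", "life"] (PySem.Dict.ofList tc).items)] := by
    rw [hB0, fold_nicheStep_char]
    simp
  dsimp only
  rw [hA, hB]
  apply finish_eq
  simp [PySem.Dict.keys]
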